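-- pv_equiv track=rewrite | github.com/cmdsa/MEI-1920 | 1ºANO/2ºSemestre/Criptografia/Estruturas Criptograficas/TP4/cshake.py | bytepad
-- ===== SOURCE A (Python) =====
-- def left_encode(x):
--     """function bytepad
--
--         left_encode(x) encodes the integer x as a byte string in a way that can be unambiguously parsed from the beginning of the string by inserting the length of the byte string before the byte string representation of x. As an example, left_encode(0) will yield 00000001 00000000.
--
--         Args:
--         x: the input integer
--
--         Returns:
--         O: binary string
--     """
--     if (x >= 0) and (x < (1 << 2040)):
--         x_bin = '{0:b}'.format(x)
--         On = x_bin
--         while (len(On) % 8) != 0: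
--             On = '0' + On
--         n = len(On) // 8
--         n_bin = '{0:b}'.format(n)
--         O0 = n_bin
--         while (len(O0) % 8) != 0:
--             O0 = '0' + O0
--         O = O0 + On
--         return O
--     else:
--         print ('Invalid bit string (left_encode)')
--
-- def bytepad(X, w):
--     """function bytepad
--
--         The bytepad(X, w) function prepends an encoding of the integer w to an input string X, then pads the result with zeros until it is a byte string whose length in bytes is a multiple of w. In general, bytepad is intended to be used on encoded strings-the byte string bytepad(encode_string(S), w) can be parsed unambiguously from its beginning, whereas bytepad does not provide unambiguous padding for all input strings.
--
--         Args:
--         X: the input binary string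
--         w: the rate (in bytes) of the KECCAK sponge function
--
--         Returns:
--         z: binary string
--     """
--     if w > 0:
--         z = left_encode(w) + X
--         while (len(z) % 8) != 0:
--             z += '0'
--         while ((len(z) / 8) % w) != 0:
--             z += '00000000'
--         return z
--     else:
--         print ('Invalid integer (bytepad)')
-- ===== SOURCE B (Python) =====
-- def bytepad(X, w):
--     if w <= 0:
--         return None  # A prints and falls through to None here
--     # base-256 digits of w, little-endian
--     digits = []
--     t = w
--     while t:
--         digits.append(t & 255)
--         t >>= 8
--     # left_encode(w) as bytes: byte count, then big-endian digits; each rendered as 8 bits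
--     prefix = ''.join(format(v, '08b') for v in [len(digits)] + digits[::-1]) + X
--     W = 8 * w
--     final = W * ((len(prefix) + W - 1) // W)
--     return prefix.ljust(final, '0')
-- ===== Notes on version B (the rewrite author's own statement) =====
-- stated objective: faster
-- what changed: B builds left_encode's output from the base-256 digits of w (extracted by shifts/masks, each rendered as one 8-bit byte) instead of A's binary-string-with-prepend-zero loops, and replaces A's two append-until-aligned padding loops by a single ceiling formula final = 8w*ceil(len/(8w)) plus one ljust.
import Mathlib
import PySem

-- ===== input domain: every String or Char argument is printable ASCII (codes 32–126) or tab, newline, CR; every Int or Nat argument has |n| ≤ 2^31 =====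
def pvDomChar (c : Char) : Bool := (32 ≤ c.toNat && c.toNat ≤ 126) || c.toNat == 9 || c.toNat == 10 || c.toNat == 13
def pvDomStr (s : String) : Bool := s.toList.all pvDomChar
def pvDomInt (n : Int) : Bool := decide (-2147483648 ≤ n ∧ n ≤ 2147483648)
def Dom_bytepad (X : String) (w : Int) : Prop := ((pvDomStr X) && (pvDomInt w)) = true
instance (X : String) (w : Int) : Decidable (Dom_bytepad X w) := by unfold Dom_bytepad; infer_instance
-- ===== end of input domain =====

-- B builds the encoding from w's base-256 digits and pads with one closed-form ceiling instead of A's bit-string loops (objective: faster, linear output construction).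

-- ===== PORT A =====

-- '{0:b}'.format(n) : binary representation of a natural number, no leading zeros ("0" for 0)
def binStrAux (n : Nat) (acc : List Char) : List Char :=
  if h : n = 0 then acc
  else binStrAux (n / 2) ((if n % 2 = 1 then '1' else '0') :: acc)
termination_by n
decreasing_by exact Nat.div_lt_self (Nat.pos_of_ne_zero h) Nat.one_lt_two

def binStr (n : Nat) : List Char :=
  if n = 0 then ['0'] else binStrAux n []

-- A's `while (len(On) % 8) != 0: On = '0' + On` (fuel 8: the loop prepends at most 7 zeros)
def padPre : Nat → List Char → List Char
  | 0, s => s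
  | f + 1, s => if s.length % 8 = 0 then s else padPre f ('0' :: s)

def left_encode (x : Int) : Option (List Char) :=
  if 0 ≤ x ∧ x < 2 ^ 2040 then
    let On := padPre 8 (binStr x.toNat)
    let n := On.length / 8
    let O0 := padPre 8 (binStr n)
    some (O0 ++ On)
  else none   -- Python prints and returns None

-- A's `while (len(z) % 8) != 0: z += '0'` (fuel 8: the loop appends at most 7 zeros)
def padEnd8 : Nat → List Char → List Char
  | 0, s => s
  | f + 1, s => if s.length % 8 = 0 then s else padEnd8 f (s ++ ['0'])

-- A's `while ((len(z) / 8) % w) != 0: z += '00000000'` (fuel w: the loop runs at most w-1 times)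
def padWFuel (w : Nat) : Nat → List Char → List Char
  | 0, s => s
  | f + 1, s =>
    if (s.length / 8) % w = 0 then s else padWFuel w f (s ++ List.replicate 8 '0')

def bytepad (X : String) (w : Int) : Option String :=
  if 0 < w then
    match left_encode w with
    | none => none   -- Python raises TypeError (None + str); unreachable on Dom (w ≤ 2^31 < 2^2040)
    | some le =>
      let z := le ++ X.toList
      let z := padEnd8 8 z
      let z := padWFuel w.toNat w.toNat z
      some (String.ofList z)
  else none   -- Python prints and returns None

-- ===== PORT B =====

-- B's `while t: digits.append(t & 255); t >>= 8` : base-256 digits, little-endian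
def bytesLE (t : Nat) : List Nat :=
  if h : t = 0 then []
  else t % 256 :: bytesLE (t / 256)
termination_by t
decreasing_by exact Nat.div_lt_self (Nat.pos_of_ne_zero h) (by norm_num)

-- format(v, '08b'): v rendered as exactly 8 binary digits (faithful for v < 256, the only values B feeds it)
def bits8Aux : Nat → Nat → List Char → List Char
  | 0, _, acc => acc
  | k + 1, v, acc => bits8Aux k (v / 2) ((if v % 2 = 1 then '1' else '0') :: acc)

def bits8 (v : Nat) : List Char := bits8Aux 8 v []

def bytepad_alt (X : String) (w : Int) : Option String :=
  if w ≤ 0 then none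
  else
    let digits := bytesLE w.toNat
    -- ''.join(format(v,'08b') for v in [len(digits)] + digits[::-1]) + X
    let pre := ((digits.length :: digits.reverse).map bits8).flatten ++ X.toList
    let W := 8 * w.toNat
    let final := W * ((pre.length + W - 1) / W)
    -- prefix.ljust(final, '0')
    some (String.ofList (pre ++ List.replicate (final - pre.length) '0'))

-- ===== PRECONDITION & SPEC =====
def Spec_bytepad (X : String) (w : Int) (out : Option String) : Prop := out = bytepad_alt X w
instance (X : String) (w : Int) (out : Option String) : Decidable (Spec_bytepad X w out) := by unfold Spec_bytepad; infer_instance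

-- ===== CLAIM (what is proved, stated in full; the proofs are below) =====
def Claim_equal_bytepad : Prop := ∀ (X : String) (w : Int), Dom_bytepad X w → Spec_bytepad X w (bytepad X w)

-- ===== LEMMAS AND PROOFS =====

lemma padPre_eq (f : Nat) (s : List Char) (hf : (8 - s.length % 8) % 8 ≤ f) :
    padPre f s = List.replicate ((8 - s.length % 8) % 8) '0' ++ s := by
  induction f generalizing s with
  | zero =>
    have h0 : (8 - s.length % 8) % 8 = 0 := by omega
    simp [padPre, h0]
  | succ f ih =>
    by_cases h : s.length % 8 = 0
    · have h0 : (8 - s.length % 8) % 8 = 0 := by omega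
      simp [padPre, h]
    · rw [show padPre (f + 1) s = padPre f ('0' :: s) by simp [padPre, h]]
      rw [ih ('0' :: s) (by simp only [List.length_cons]; omega)]
      have h1 : (8 - s.length % 8) % 8 = (8 - ('0' :: s).length % 8) % 8 + 1 := by
        simp only [List.length_cons]; omega
      rw [h1, List.replicate_succ', List.append_assoc]
      rfl

lemma padEnd8_eq (f : Nat) (s : List Char) (hf : (8 - s.length % 8) % 8 ≤ f) :
    padEnd8 f s = s ++ List.replicate ((8 - s.length % 8) % 8) '0' := by
  induction f generalizing s with
  | zero =>
    have h0 : (8 - s.length % 8) % 8 = 0 := by omega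
    simp [padEnd8, h0]
  | succ f ih =>
    by_cases h : s.length % 8 = 0
    · have h0 : (8 - s.length % 8) % 8 = 0 := by omega
      simp [padEnd8, h]
    · rw [show padEnd8 (f + 1) s = padEnd8 f (s ++ ['0']) by simp [padEnd8, h]]
      rw [ih (s ++ ['0']) (by simp only [List.length_append, List.length_cons, List.length_nil]; omega)]
      have h1 : (8 - s.length % 8) % 8 = (8 - (s ++ ['0']).length % 8) % 8 + 1 := by
        simp only [List.length_append, List.length_cons, List.length_nil]; omega
      rw [h1, List.replicate_succ, List.append_assoc]
      rfl

lemma stepm (w q : Nat) (hw : w ≠ 0) (hr : q % w ≠ 0) :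
    (w - (q + 1) % w) % w + 1 = (w - q % w) % w := by
  have hlt : q % w < w := Nat.mod_lt _ (Nat.pos_of_ne_zero hw)
  have h2 : 2 ≤ w := by omega
  have h1 : (q + 1) % w = (q % w + 1) % w := by
    conv_lhs => rw [Nat.add_mod]
    rw [Nat.mod_eq_of_lt (show 1 < w from h2)]
  rw [h1]
  rcases eq_or_lt_of_le (show q % w + 1 ≤ w by omega) with he | hlt2
  · rw [he, Nat.mod_self, Nat.sub_zero, Nat.mod_self,
      Nat.mod_eq_of_lt (show w - q % w < w by omega)]
    omega
  · rw [Nat.mod_eq_of_lt hlt2, Nat.mod_eq_of_lt (show w - (q % w + 1) < w by omega),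
      Nat.mod_eq_of_lt (show w - q % w < w by omega)]
    omega

lemma padWFuel_eq (w : Nat) (hw : w ≠ 0) (f : Nat) (s : List Char)
    (hf : (w - (s.length / 8) % w) % w ≤ f) :
    padWFuel w f s = s ++ List.replicate (((w - (s.length / 8) % w) % w) * 8) '0' := by
  induction f generalizing s with
  | zero =>
    have h0 : (w - (s.length / 8) % w) % w = 0 := by omega
    simp [padWFuel, h0]
  | succ f ih =>
    by_cases hr : (s.length / 8) % w = 0
    · have h0 : (w - (s.length / 8) % w) % w = 0 := by
        rw [hr, Nat.sub_zero, Nat.mod_self]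
      simp [padWFuel, hr]
    · have hlen : (s ++ List.replicate 8 '0').length = s.length + 8 := by simp
      have hdiv : (s.length + 8) / 8 = s.length / 8 + 1 := by omega
      have hstep := stepm w (s.length / 8) hw hr
      rw [show padWFuel w (f + 1) s = padWFuel w f (s ++ List.replicate 8 '0') by
        simp [padWFuel, hr]]
      rw [ih (s ++ List.replicate 8 '0') (by rw [hlen, hdiv]; omega)]
      rw [hlen, hdiv]
      rw [show (w - (s.length / 8) % w) % w = (w - (s.length / 8 + 1) % w) % w + 1 from
        hstep.symm]
      rw [List.append_assoc]
      congr 1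
      rw [show ((w - (s.length / 8 + 1) % w) % w + 1) * 8
            = 8 + (w - (s.length / 8 + 1) % w) % w * 8 by ring,
        List.replicate_add]

-- ----- bits8 / binStr structure lemmas -----

lemma bits8Aux_length (k v : Nat) (acc : List Char) :
    (bits8Aux k v acc).length = k + acc.length := by
  induction k generalizing v acc with
  | zero => simp [bits8Aux]
  | succ k ih => simp [bits8Aux, ih]; omega

lemma bits8Aux_zero (k : Nat) (acc : List Char) :
    bits8Aux k 0 acc = List.replicate k '0' ++ acc := by
  induction k generalizing acc with
  | zero => simp [bits8Aux]
  | succ k ih =>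
    rw [show bits8Aux (k + 1) 0 acc = bits8Aux k 0 ('0' :: acc) by simp [bits8Aux]]
    rw [ih, List.replicate_succ', List.append_assoc]
    rfl

lemma binStrAux_append (x : Nat) (acc : List Char) :
    binStrAux x acc = binStrAux x [] ++ acc := by
  induction x using Nat.strong_induction_on generalizing acc with
  | _ x ih =>
    by_cases h : x = 0
    · simp [binStrAux, h]
    · rw [show binStrAux x acc
          = binStrAux (x / 2) ((if x % 2 = 1 then '1' else '0') :: acc) by
        rw [binStrAux]; simp [h]]
      rw [show binStrAux x ([] : List Char)
          = binStrAux (x / 2) [(if x % 2 = 1 then '1' else '0')] by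
        rw [binStrAux]; simp [h]]
      rw [ih (x / 2) (Nat.div_lt_self (Nat.pos_of_ne_zero h) Nat.one_lt_two),
          ih (x / 2) (Nat.div_lt_self (Nat.pos_of_ne_zero h) Nat.one_lt_two)
            (acc := [(if x % 2 = 1 then '1' else '0')]),
          List.append_assoc]
      rfl

lemma binStrAux_len_pos (x : Nat) (hx : 0 < x) : 0 < (binStrAux x []).length := by
  rw [show binStrAux x ([] : List Char)
      = binStrAux (x / 2) [(if x % 2 = 1 then '1' else '0')] by
    rw [binStrAux]; simp [Nat.pos_iff_ne_zero.mp hx]]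
  rw [binStrAux_append]
  simp

-- format(v,'08b')-style: k-bit rendering of 0 < v < 2^k is the binary string left-padded to k
lemma bits8Aux_pos (k : Nat) (v : Nat) (acc : List Char) (hv : 0 < v) (hlt : v < 2 ^ k) :
    bits8Aux k v acc
      = List.replicate (k - (binStrAux v []).length) '0' ++ binStrAux v [] ++ acc := by
  induction k generalizing v acc with
  | zero => omega
  | succ k ih =>
    have hx : v ≠ 0 := by omega
    rw [show bits8Aux (k + 1) v acc
        = bits8Aux k (v / 2) ((if v % 2 = 1 then '1' else '0') :: acc) by simp [bits8Aux]]
    have hbin : binStrAux v ([] : List Char)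
        = binStrAux (v / 2) [] ++ [(if v % 2 = 1 then '1' else '0')] := by
      rw [show binStrAux v ([] : List Char)
          = binStrAux (v / 2) [(if v % 2 = 1 then '1' else '0')] by
        rw [binStrAux]; simp [hx]]
      exact binStrAux_append _ _
    by_cases h2 : v / 2 = 0
    · have hv1 : v = 1 := by omega
      subst hv1
      rw [bits8Aux_zero, hbin]
      simp [binStrAux]
    · have hlt2 : v / 2 < 2 ^ k := by
        rw [pow_succ] at hlt; omega
      rw [ih (v / 2) _ (Nat.pos_of_ne_zero h2) hlt2, hbin]
      have hlen : (binStrAux (v / 2) [] ++ [(if v % 2 = 1 then '1' else '0')]).length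
          = (binStrAux (v / 2) []).length + 1 := by simp
      rw [hlen]
      rw [show k + 1 - ((binStrAux (v / 2) []).length + 1)
            = k - (binStrAux (v / 2) []).length by omega]
      simp [List.append_assoc]

-- length bound: 0 < v < 2^k → binary length ≤ k
lemma binStr_len_le (k v : Nat) (hv : 0 < v) (hlt : v < 2 ^ k) :
    (binStrAux v []).length ≤ k := by
  have h := congrArg List.length (bits8Aux_pos k v [] hv hlt)
  rw [bits8Aux_length] at h
  simp at h
  omega

-- bits8Aux only looks at the low k bits
lemma bits8Aux_mod (k v : Nat) (acc : List Char) :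
    bits8Aux k v acc = bits8Aux k (v % 2 ^ k) acc := by
  induction k generalizing v acc with
  | zero => simp [bits8Aux]
  | succ k ih =>
    rw [show bits8Aux (k + 1) v acc
        = bits8Aux k (v / 2) ((if v % 2 = 1 then '1' else '0') :: acc) by simp [bits8Aux]]
    rw [show bits8Aux (k + 1) (v % 2 ^ (k + 1)) acc
        = bits8Aux k ((v % 2 ^ (k + 1)) / 2)
            ((if (v % 2 ^ (k + 1)) % 2 = 1 then '1' else '0') :: acc) by simp [bits8Aux]]
    have hmod2 : (v % 2 ^ (k + 1)) % 2 = v % 2 :=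
      Nat.mod_mod_of_dvd v (dvd_pow_self 2 (Nat.succ_ne_zero k))
    have hdiv : (v % 2 ^ (k + 1)) / 2 = (v / 2) % 2 ^ k := by
      rw [pow_succ, mul_comm]
      exact Nat.mod_mul_right_div_self v 2 (2 ^ k)
    rw [hmod2, hdiv, ← ih]

-- peel the low k bits off binStrAux
lemma binStrAux_peel (k : Nat) (x : Nat) (acc : List Char) (hk : 2 ^ k ≤ x) :
    binStrAux x acc = binStrAux (x / 2 ^ k) (bits8Aux k x acc) := by
  induction k generalizing x acc with
  | zero => simp [bits8Aux]
  | succ k ih =>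
    have hx : x ≠ 0 := by
      have := Nat.one_le_two_pow (n := k + 1); omega
    rw [show binStrAux x acc
        = binStrAux (x / 2) ((if x % 2 = 1 then '1' else '0') :: acc) by
      rw [binStrAux]; simp [hx]]
    have hle : 2 ^ k ≤ x / 2 := by
      rw [Nat.le_div_iff_mul_le (by norm_num)]
      rw [pow_succ] at hk; omega
    rw [ih (x / 2) _ hle]
    rw [Nat.div_div_eq_div_mul, show (2 : Nat) * 2 ^ k = 2 ^ (k + 1) by
      rw [pow_succ, Nat.mul_comm]]
    rfl

-- ----- bytesLE lemmas -----

lemma bytesLE_zero : bytesLE 0 = [] := by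
  rw [bytesLE]
  rfl

lemma bytesLE_cons (x : Nat) (h : x ≠ 0) : bytesLE x = x % 256 :: bytesLE (x / 256) := by
  rw [bytesLE, dif_neg h]

lemma bytesLE_len_le (k x : Nat) (h : x < 256 ^ k) : (bytesLE x).length ≤ k := by
  induction k generalizing x with
  | zero =>
    have hx0 : x = 0 := by simpa using h
    subst hx0
    rw [bytesLE_zero]
    simp
  | succ k ih =>
    by_cases h0 : x = 0
    · subst h0
      rw [bytesLE_zero]
      simp
    · rw [bytesLE_cons x h0]; simp only [List.length_cons]
      have : x / 256 < 256 ^ k := by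
        rw [Nat.div_lt_iff_lt_mul (by norm_num : 0 < 256)]
        rw [pow_succ] at h; omega
      have := ih _ this
      omega

lemma flatten_map_bits8_length (l : List Nat) :
    ((l.map bits8).flatten).length = 8 * l.length := by
  induction l with
  | nil => simp
  | cons a l ih =>
    simp only [List.map_cons, List.flatten_cons, List.length_append, ih, List.length_cons]
    have : (bits8 a).length = 8 := by
      have := bits8Aux_length 8 a []; simpa [bits8] using this
    omega

-- MAIN bytes lemma: big-endian base-256 digits rendered 8 bits each = binary padded to a byte multiple
lemma bytes_eq_paddedBin (x : Nat) (hx : 0 < x) :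
    (((bytesLE x).reverse.map bits8).flatten)
      = List.replicate ((8 - (binStr x).length % 8) % 8) '0' ++ binStr x := by
  induction x using Nat.strong_induction_on with
  | _ x ih =>
    have hx0 : x ≠ 0 := by omega
    rw [bytesLE_cons x hx0]
    rw [List.reverse_cons, List.map_append, List.flatten_append]
    by_cases hlt : x < 256
    · have hdiv : x / 256 = 0 := Nat.div_eq_of_lt hlt
      have hmod : x % 256 = x := Nat.mod_eq_of_lt hlt
      rw [hdiv, hmod]
      rw [bytesLE_zero]
      simp only [List.reverse_nil, List.map_nil, List.flatten_nil,
        List.map_cons, List.map_nil, List.flatten_cons, List.flatten_nil,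
        List.nil_append, List.append_nil]
      have hb : binStr x = binStrAux x [] := by simp [binStr, hx0]
      have h8 : bits8 x
          = List.replicate (8 - (binStrAux x []).length) '0' ++ binStrAux x [] := by
        have := bits8Aux_pos 8 x [] hx (by norm_num; omega)
        simpa [bits8] using this
      have hlen1 : 0 < (binStrAux x []).length := binStrAux_len_pos x hx
      have hlen8 : (binStrAux x []).length ≤ 8 := binStr_len_le 8 x hx (by norm_num; omega)
      rw [h8, hb]
      congr 1
      congr 1
      omega
    · have hge : 256 ≤ x := by omega
      have hq : 0 < x / 256 := Nat.div_pos hge (by norm_num)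
      have hqlt : x / 256 < x := Nat.div_lt_self hx (by norm_num)
      -- binStr x = binStr (x/256) ++ bits8 (x % 256)
      have hsplit : binStr x = binStr (x / 256) ++ bits8 (x % 256) := by
        have h1 : binStr x = binStrAux x [] := by simp [binStr, hx0]
        have h2 : binStr (x / 256) = binStrAux (x / 256) [] := by
          simp [binStr, Nat.pos_iff_ne_zero.mp hq]
        rw [h1, h2, binStrAux_peel 8 x [] (by norm_num; omega)]
        rw [show (2 : Nat) ^ 8 = 256 by norm_num]
        rw [bits8Aux_mod 8 x []]
        rw [show (2 : Nat) ^ 8 = 256 by norm_num]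
        rw [binStrAux_append]
        rfl
      have hlen : (binStr x).length = (binStr (x / 256)).length + 8 := by
        rw [hsplit]
        have : (bits8 (x % 256)).length = 8 := by
          have := bits8Aux_length 8 (x % 256) []; simpa [bits8] using this
        simp [this]
      have hpad : (8 - (binStr x).length % 8) % 8
          = (8 - (binStr (x / 256)).length % 8) % 8 := by
        rw [hlen]; omega
      rw [ih (x / 256) hqlt hq, hpad, hsplit]
      simp [List.append_assoc]

-- ----- padding arithmetic -----

lemma ceil_step_a (W B : Nat) (hW : 0 < W) :
    B + (W - B % W) % W = W * ((B + W - 1) / W) := by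
  have hd := Nat.div_add_mod B W
  set c := B / W with hc
  set m := B % W with hm
  have hmlt : m < W := Nat.mod_lt _ hW
  by_cases h0 : m = 0
  · have hB : B = W * c := by omega
    have : (B + W - 1) / W = c := by
      rw [hB, show W * c + W - 1 = W * c + (W - 1) by omega,
        Nat.mul_add_div hW]
      simp [Nat.div_eq_of_lt (show W - 1 < W by omega)]
    rw [this, h0]
    simp [hB, Nat.mod_self]
  · have hq : (W - m) % W = W - m := Nat.mod_eq_of_lt (by omega)
    have hB : B = W * c + m := by omega
    have : (B + W - 1) / W = c + 1 := by
      rw [hB, show W * c + m + W - 1 = W * c + (m + W - 1) by omega,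
        Nat.mul_add_div hW]
      have : (m + W - 1) / W = 1 :=
        Nat.div_eq_of_lt_le (by omega) (by omega)
      omega
    rw [this, hq, hB, Nat.mul_add, Nat.mul_one]
    omega

lemma ceil_step_b (W B L : Nat) (hW : 0 < W) (hL1 : 8 * B ≤ L + 7) (hL2 : L ≤ 8 * B) :
    (L + 8 * W - 1) / (8 * W) = (B + W - 1) / W := by
  have hd := Nat.div_add_mod (B + W - 1) W
  set c := (B + W - 1) / W with hc
  set s := (B + W - 1) % W with hs
  have hslt : s < W := Nat.mod_lt _ hW
  have heq : B + W - 1 = W * c + s := by omega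
  refine Nat.div_eq_of_lt_le ?_ ?_
  · -- c * (8 * W) ≤ L + 8 * W - 1
    have h1 : 8 * (W * c) + 8 * s = 8 * (B + W - 1) := by omega
    calc c * (8 * W) = 8 * (W * c) := by ring
      _ ≤ 8 * (W * c) + 8 * s := by omega
      _ = 8 * (B + W - 1) := h1
      _ ≤ L + 8 * W - 1 := by omega
  · -- L + 8 * W - 1 < (c + 1) * (8 * W)
    have h1 : 8 * (W * c) + 8 * s = 8 * (B + W - 1) := by omega
    have h2 : L + 8 * W - 1 ≤ 8 * (B + W - 1) + 7 := by omega
    have h3 : 8 * s ≤ 8 * (W - 1) := by omega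
    calc L + 8 * W - 1 ≤ 8 * (W * c) + 8 * s + 7 := by omega
      _ ≤ 8 * (W * c) + 8 * (W - 1) + 7 := by omega
      _ < (c + 1) * (8 * W) := by
          have : (c + 1) * (8 * W) = 8 * (W * c) + 8 * W := by ring
          omega

lemma pad_total (W L : Nat) (hW : 0 < W) (hL : 0 < L) :
    L + (8 - L % 8) % 8
      + ((W - ((L + (8 - L % 8) % 8) / 8) % W) % W) * 8
      = 8 * W * ((L + 8 * W - 1) / (8 * W)) := by
  set p := (8 - L % 8) % 8 with hp
  set B := (L + p) / 8 with hB
  have h8B : L + p = 8 * B := by omega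
  have hL1 : 8 * B ≤ L + 7 := by omega
  have hL2 : L ≤ 8 * B := by omega
  have ha := ceil_step_a W B hW
  have hb := ceil_step_b W B L hW hL1 hL2
  rw [hb]
  have : 8 * W * ((B + W - 1) / W) = 8 * (W * ((B + W - 1) / W)) := by ring
  rw [this, ← ha]
  omega

-- ===== VERDICT (by name: the statement is the Claim_ definition above) =====
theorem bytepad_spec : Claim_equal_bytepad := by
  intro X w hdom
  unfold Spec_bytepad bytepad bytepad_alt left_encode
  have hw' : pvDomInt w = true := by
    unfold Dom_bytepad at hdom
    exact (Bool.and_eq_true_iff.mp hdom).2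
  have hwle : w ≤ 2147483648 := by
    have := of_decide_eq_true hw'
    exact this.2
  by_cases hw : 0 < w
  · have hwn : ¬ w ≤ 0 := by omega
    have hbig : w < 2 ^ 2040 := by
      calc w ≤ 2147483648 := hwle
        _ = 2 ^ 31 := by norm_num
        _ < 2 ^ 2040 := by
          exact pow_lt_pow_right₀ (by norm_num : (1:Int) < 2) (by norm_num)
    simp only [hw, hwn, if_true, if_false, if_pos (And.intro (le_of_lt hw) hbig)]
    have hwnz : w.toNat ≠ 0 := by omega
    have hwpos : 0 < w.toNat := Nat.pos_of_ne_zero hwnz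
    -- On (A) = flattened big-endian bytes (B)
    have hOn : padPre 8 (binStr w.toNat)
        = (((bytesLE w.toNat).reverse.map bits8).flatten) := by
      rw [padPre_eq 8 (binStr w.toNat) (by omega)]
      rw [bytes_eq_paddedBin w.toNat hwpos]
    -- n (A) = number of bytes (B)
    have hOnLen : (padPre 8 (binStr w.toNat)).length = 8 * (bytesLE w.toNat).length := by
      rw [hOn]
      have := flatten_map_bits8_length (bytesLE w.toNat).reverse
      simpa using this
    have hn : (padPre 8 (binStr w.toNat)).length / 8 = (bytesLE w.toNat).length := by
      rw [hOnLen]; omega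
    -- O0 (A) = bits8 of the byte count (B)
    have hlenpos : 0 < (bytesLE w.toNat).length := by
      rw [bytesLE_cons _ hwnz]
      simp
    have hlenlt : (bytesLE w.toNat).length < 256 := by
      have h4 : (bytesLE w.toNat).length ≤ 4 := by
        refine bytesLE_len_le 4 w.toNat ?_
        have : w.toNat ≤ 2147483648 := by omega
        calc w.toNat ≤ 2147483648 := this
          _ < 256 ^ 4 := by norm_num
      omega
    have hO0 : padPre 8 (binStr (bytesLE w.toNat).length)
        = bits8 (bytesLE w.toNat).length := by
      set n := (bytesLE w.toNat).length with hndef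
      have hnnz : n ≠ 0 := by omega
      have hb : binStr n = binStrAux n [] := by simp [binStr, hnnz]
      have h8 : bits8 n
          = List.replicate (8 - (binStrAux n []).length) '0' ++ binStrAux n [] := by
        have := bits8Aux_pos 8 n [] (by omega) (by norm_num; omega)
        simpa [bits8] using this
      have hlen1 : 0 < (binStrAux n []).length := binStrAux_len_pos n (by omega)
      have hlen8 : (binStrAux n []).length ≤ 8 := binStr_len_le 8 n (by omega) (by norm_num; omega)
      rw [padPre_eq 8 _ (by omega), hb, h8]
      congr 2
      omega
    -- rewrite A's padding loops to closed forms
    rw [padEnd8_eq 8 _ (by omega)]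
    rw [padWFuel_eq w.toNat hwnz w.toNat _ (le_of_lt (Nat.mod_lt _ hwpos))]
    rw [hn, hO0, hOn]
    refine congrArg (fun l => some (String.ofList l)) ?_
    -- both sides: prefix ++ zeros; compare zero counts via pad_total
    rw [List.map_cons, List.flatten_cons]
    set pre := bits8 (bytesLE w.toNat).length
        ++ (((bytesLE w.toNat).reverse.map bits8).flatten) ++ X.toList with hpre
    have hLpos : 0 < pre.length := by
      rw [hpre]
      have : (bits8 (bytesLE w.toNat).length).length = 8 := by
        have := bits8Aux_length 8 (bytesLE w.toNat).length []
        simpa [bits8] using this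
      simp [this]
    set L := pre.length with hL
    have hlen2 : (pre ++ List.replicate ((8 - L % 8) % 8) '0').length
        = L + (8 - L % 8) % 8 := by simp [hL]
    rw [hlen2, List.append_assoc, ← List.replicate_add]
    have hcount : (8 - L % 8) % 8
          + (w.toNat - (L + (8 - L % 8) % 8) / 8 % w.toNat) % w.toNat * 8
        = 8 * w.toNat * ((L + 8 * w.toNat - 1) / (8 * w.toNat)) - L := by
      have h := pad_total w.toNat L hwpos hLpos
      omega
    rw [hcount]
  · have hwn : w ≤ 0 := by omega
    simp [hw, hwn]
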